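-- pv_equiv track=rewrite | github.com/ZiggyMack/Nyquist_Consciousness | dashboard/utils.py | load_glossary_entries
-- ===== SOURCE A (Python) =====
-- def load_glossary_entries(text):
--     """Parse glossary markdown into term/definition pairs."""
--     entries = []
--     current_term = None
--     current_lines = []
--
--     for line in text.splitlines():
--         if line.startswith("## "):
--             if current_term:
--                 entries.append({
--                     "term": current_term,
--                     "definition": "\n".join(current_lines).strip()
--                 })
--             current_term = line.lstrip("# ").strip()
--             current_lines = []
--         else:
--             current_lines.append(line)
--
--     if current_term:
--         entries.append({
--             "term": current_term,
--             "definition": "\n".join(current_lines).strip()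
--         })
--
--     return entries
-- ===== SOURCE B (Python) =====
-- def load_glossary_entries(text):
--     """Parse glossary markdown into term/definition pairs.
--     Recursive section-splitting: drop the preamble, then repeatedly split off
--     one '## ' section (header + body up to the next header) and recurse."""
--
--     def parse(lines):
--         # lines is empty or starts with a '## ' header
--         if not lines:
--             return []
--         j = 1
--         while j < len(lines) and not lines[j].startswith("## "):
--             j += 1
--         term = lines[0].lstrip("# ").strip()
--         rest = parse(lines[j:])
--         if term:
--             return [{"term": term,
--                      "definition": "\n".join(lines[1:j]).strip()}] + rest
--         return rest
--
--     lines = text.splitlines()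
--     i = 0
--     while i < len(lines) and not lines[i].startswith("## "):
--         i += 1
--     return parse(lines[i:])
-- ===== Notes on version B (the rewrite author's own statement) =====
-- stated objective: alternative
-- what changed: Replaced the single-pass accumulator state machine (current_term/current_lines carried across lines and flushed at each header) by a recursive section splitter: drop the preamble, then repeatedly cut one header-plus-body section off the front and recurse on the remainder.
import Mathlib
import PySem

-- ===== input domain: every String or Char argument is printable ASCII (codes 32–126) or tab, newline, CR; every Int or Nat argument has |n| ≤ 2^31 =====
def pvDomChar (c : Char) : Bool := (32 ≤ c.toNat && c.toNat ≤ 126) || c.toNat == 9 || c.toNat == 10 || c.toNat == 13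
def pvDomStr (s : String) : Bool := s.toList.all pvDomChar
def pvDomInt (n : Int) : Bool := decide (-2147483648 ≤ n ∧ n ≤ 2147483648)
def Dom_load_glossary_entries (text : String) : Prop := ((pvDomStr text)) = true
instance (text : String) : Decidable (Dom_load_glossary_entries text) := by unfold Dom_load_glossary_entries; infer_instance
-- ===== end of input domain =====

-- B replaces A's accumulator state machine by a recursive section splitter; same output, same cost (objective: alternative).

-- shared string helpers (identical sub-expressions of both Pythons)
-- line.startswith("## ")
def pvIsHeader (l : String) : Bool := PySem.Str.startswith l "## "
-- line.lstrip("# ").strip() — lstrip("# ") ported by hand as dropping leading chars from {'#',' '} (exact: that is Python's charset lstrip)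
def pvTerm (l : String) : String :=
  PySem.Str.strip (String.ofList (l.toList.dropWhile (fun c => c == '#' || c == ' ')))
-- "\n".join(lines).strip()
def pvDef (lines : List String) : String :=
  PySem.Str.strip (PySem.Str.join "\n" lines)

-- ===== PORT A =====
-- the flush 'if current_term: entries.append({...})' (current_term is None or a string; truthy = some nonempty string)
def pvClose (cur : Option String) (acc : List String) : List (List (String × String)) :=
  match cur with
  | none => []
  | some t => if t = "" then [] else [[("term", t), ("definition", pvDef acc)]]

-- the for-loop with state (entries, current_term, current_lines), then the final flush
def pvGoA : List String → List (List (String × String)) → Option String → List String →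
    List (List (String × String))
  | [], entries, cur, acc => entries ++ pvClose cur acc
  | l :: ls, entries, cur, acc =>
    if pvIsHeader l then pvGoA ls (entries ++ pvClose cur acc) (some (pvTerm l)) []
    else pvGoA ls entries cur (acc ++ [l])

def load_glossary_entries (text : String) : List (List (String × String)) :=
  pvGoA (PySem.Str.splitlines text) [] none []

-- ===== PORT B =====
-- Source B's parse: lines is empty or starts with a header; the inner while loop finding j
-- is the linear scan for the next header, so lines[1:j] = takeWhile, lines[j:] = dropWhile on the tail
def pvParse : List String → List (List (String × String))
  | [] => []
  | h :: rest =>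
    let body := rest.takeWhile (fun l => !pvIsHeader l)
    let rest' := rest.dropWhile (fun l => !pvIsHeader l)
    let t := pvTerm h
    (if t = "" then [] else [[("term", t), ("definition", pvDef body)]]) ++ pvParse rest'
  termination_by l => l.length
  decreasing_by
    simpa using Nat.lt_succ_of_le (List.length_dropWhile_le _ _)

-- Source B's outer while loop skipping the preamble is the same linear scan = dropWhile
def load_glossary_entries_alt (text : String) : List (List (String × String)) :=
  pvParse ((PySem.Str.splitlines text).dropWhile (fun l => !pvIsHeader l))

-- ===== PRECONDITION & SPEC =====
def Spec_load_glossary_entries (text : String) (out : List (List (String × String))) : Prop := out = load_glossary_entries_alt text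
instance (text : String) (out : List (List (String × String))) : Decidable (Spec_load_glossary_entries text out) := by unfold Spec_load_glossary_entries; infer_instance

-- ===== CLAIM (what is proved, stated in full; the proofs are below) =====
def Claim_equal_load_glossary_entries : Prop := ∀ (text : String), Dom_load_glossary_entries text → Spec_load_glossary_entries text (load_glossary_entries text)

-- ===== LEMMAS AND PROOFS =====

theorem pvParse_cons (h : String) (rest : List String) :
    pvParse (h :: rest) =
      (if pvTerm h = "" then [] else
        [[("term", pvTerm h), ("definition", pvDef (rest.takeWhile (fun l => !pvIsHeader l)))]]) ++
      pvParse (rest.dropWhile (fun l => !pvIsHeader l)) := by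
  rw [pvParse]

theorem pvGoA_append (ls : List String) (entries : List (List (String × String)))
    (cur : Option String) (acc : List String) :
    pvGoA ls entries cur acc = entries ++ pvGoA ls [] cur acc := by
  induction ls generalizing entries cur acc with
  | nil => simp [pvGoA]
  | cons l ls ih =>
    by_cases hl : pvIsHeader l
    · rw [pvGoA, pvGoA, if_pos hl, if_pos hl, ih (entries ++ pvClose cur acc),
        ih ([] ++ pvClose cur acc)]
      simp
    · rw [pvGoA, pvGoA, if_neg hl, if_neg hl, ih entries (acc := acc ++ [l]),
        ih [] (acc := acc ++ [l])]

theorem pvGoA_eq_parse (ls : List String) (cur : Option String) (acc : List String) :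
    pvGoA ls [] cur acc =
      pvClose cur (acc ++ ls.takeWhile (fun l => !pvIsHeader l)) ++
      pvParse (ls.dropWhile (fun l => !pvIsHeader l)) := by
  induction ls generalizing cur acc with
  | nil => simp [pvGoA, pvParse]
  | cons l ls ih =>
    by_cases hl : pvIsHeader l
    · rw [pvGoA, if_pos hl, pvGoA_append, ih (some (pvTerm l)) []]
      simp only [List.takeWhile_cons, List.dropWhile_cons, hl, Bool.not_true,
        Bool.false_eq_true, if_false, List.nil_append, List.append_nil,
        pvParse_cons]
      rfl
    · rw [pvGoA, if_neg hl, ih cur (acc ++ [l])]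
      simp [hl]

-- ===== VERDICT (by name: the statement is the Claim_ definition above) =====
theorem load_glossary_entries_spec : Claim_equal_load_glossary_entries := by
  intro text _
  unfold Spec_load_glossary_entries load_glossary_entries load_glossary_entries_alt
  rw [pvGoA_eq_parse]
  simp [pvClose]
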